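-- pv_equiv track=rewrite | github.com/hoquangvinh124/TDT_TonDucThang | 47.py | solution
-- ===== SOURCE A (Python) =====
-- def solution(inp):
--     set_for_checking = set()
--     for t in inp:
--         if t in set_for_checking:
--             return True
--         set_for_checking.add(t)
--         set_for_checking.add(t[::-1])
--     return False
-- ===== SOURCE B (Python) =====
-- def solution(inp):
--     keys = sorted(min(t, t[::-1]) for t in inp)
--     return any(a == b for a, b in zip(keys, keys[1:]))
-- ===== Notes on version B (the rewrite author's own statement) =====
-- stated objective: alternative
-- what changed: B replaces A's single-pass hash-set scan by a staged sort-then-scan: map each string to its canonical key min(t, t[::-1]), sort the keys, and report True iff two adjacent sorted keys are equal (a duplicate exists iff some element equals a prior element or its reverse).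
import Mathlib
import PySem

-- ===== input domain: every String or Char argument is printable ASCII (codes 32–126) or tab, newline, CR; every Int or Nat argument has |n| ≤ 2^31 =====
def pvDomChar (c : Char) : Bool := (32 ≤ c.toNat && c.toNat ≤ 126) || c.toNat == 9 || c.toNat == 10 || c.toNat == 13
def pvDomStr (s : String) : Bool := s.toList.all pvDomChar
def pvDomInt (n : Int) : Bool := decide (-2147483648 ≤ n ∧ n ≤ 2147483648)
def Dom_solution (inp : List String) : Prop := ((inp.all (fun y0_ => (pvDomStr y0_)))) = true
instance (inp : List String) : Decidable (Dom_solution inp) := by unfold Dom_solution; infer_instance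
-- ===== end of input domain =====

-- B replaces A's on-line hash-set scan by a staged sort-then-scan: map every string to its
-- canonical key min(t, t[::-1]), sort the keys, and answer true iff two adjacent keys are equal.

-- t[::-1] (shared helper; PySem.Str.slice? with step -1 is exact, the step is nonzero so getD never fires)
def pyRevStr (t : String) : String := (PySem.Str.slice? t none none (-1)).getD ""

-- ===== PORT A =====
def solutionGoA : List String → PySem.Set String → Bool
  | [], _ => false
  | t :: rest, s =>
      if PySem.Set.contains s t then true
      else solutionGoA rest (PySem.Set.add (PySem.Set.add s t) (pyRevStr t))

def solution (inp : List String) : Bool := solutionGoA inp PySem.Set.empty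

-- ===== PORT B =====
-- any(a == b for a, b in zip(keys, keys[1:])) on the sorted key list
def adjEq : List String → Bool
  | a :: b :: rest => a == b || adjEq (b :: rest)
  | _ => false

def solution_alt (inp : List String) : Bool :=
  let keys := PySem.List.sorted (inp.map (fun t => min t (pyRevStr t))) (fun x => x) false
  adjEq keys

-- ===== PRECONDITION & SPEC =====
def Spec_solution (inp : List String) (out : Bool) : Prop := out = solution_alt inp
instance (inp : List String) (out : Bool) : Decidable (Spec_solution inp out) := by unfold Spec_solution; infer_instance

-- ===== CLAIM (what is proved, stated in full; the proofs are below) =====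
def Claim_equal_solution : Prop := ∀ (inp : List String), Dom_solution inp → Spec_solution inp (solution inp)

-- ===== LEMMAS AND PROOFS =====

def pvKey (t : String) : String := min t (pyRevStr t)

lemma pyRevStr_eq (t : String) : pyRevStr t = String.ofList t.toList.reverse := by
  simp [pyRevStr, PySem.Str.slice?_none_none_neg_one]

lemma pyRevStr_invol (t : String) : pyRevStr (pyRevStr t) = t := by
  simp [pyRevStr_eq]

lemma pvKey_rev (t : String) : pvKey (pyRevStr t) = pvKey t := by
  rw [pvKey, pvKey, pyRevStr_invol, min_comm]

lemma pvKey_cases (t : String) : pvKey t = t ∨ pvKey t = pyRevStr t := by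
  unfold pvKey; rw [min_def]; split <;> simp

lemma pvKey_eq_iff (u t : String) : pvKey u = pvKey t ↔ u = t ∨ u = pyRevStr t := by
  constructor
  · intro h
    rcases pvKey_cases u with hu | hu <;> rcases pvKey_cases t with ht | ht
    · left; rw [← hu, ← ht, h]
    · right; rw [← hu, ← ht, h]
    · right
      have : pyRevStr u = t := by rw [← hu, ← ht, h]
      rw [← this, pyRevStr_invol]
    · left
      have : pyRevStr u = pyRevStr t := by rw [← hu, ← ht, h]
      have := congrArg pyRevStr this
      rwa [pyRevStr_invol, pyRevStr_invol] at this
  · rintro (rfl | rfl)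
    · rfl
    · exact pvKey_rev t

-- canonical-key single-pass scan: proof-side bridge between the two ports
def solutionGoK : List String → PySem.Set String → Bool
  | [], _ => false
  | t :: rest, seen =>
      if PySem.Set.contains seen (pvKey t) then true
      else solutionGoK rest (PySem.Set.add seen (pvKey t))

lemma goA_eq_goK (inp : List String) (sA sB : PySem.Set String)
    (h : ∀ u, u ∈ sA ↔ pvKey u ∈ sB) :
    solutionGoA inp sA = solutionGoK inp sB := by
  induction inp generalizing sA sB with
  | nil => rfl
  | cons t rest ih =>
    have hc : PySem.Set.contains sA t = PySem.Set.contains sB (pvKey t) := by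
      have := h t
      by_cases hm : t ∈ sA
      · rw [(PySem.Set.contains_iff sA t).2 hm, (PySem.Set.contains_iff sB (pvKey t)).2 (this.1 hm)]
      · have hm' : pvKey t ∉ sB := fun hk => hm (this.2 hk)
        simp only [PySem.Set.contains_eq_listContains]
        simp [hm, hm']
    show (if PySem.Set.contains sA t then true
          else solutionGoA rest (PySem.Set.add (PySem.Set.add sA t) (pyRevStr t))) =
         (if PySem.Set.contains sB (pvKey t) then true
          else solutionGoK rest (PySem.Set.add sB (pvKey t)))
    rw [hc]
    rcases hb : PySem.Set.contains sB (pvKey t) with _ | _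
    · simp only [Bool.false_eq_true, if_false]
      apply ih
      intro u
      rw [PySem.Set.mem_add, PySem.Set.mem_add, PySem.Set.mem_add, h u]
      constructor
      · rintro ((hu | rfl) | hu)
        · exact Or.inl hu
        · exact Or.inr rfl
        · exact Or.inr ((pvKey_eq_iff u t).2 (Or.inr hu))
      · rintro (hu | hk)
        · exact Or.inl (Or.inl hu)
        · rcases (pvKey_eq_iff u t).1 hk with rfl | rfl
          · exact Or.inl (Or.inr rfl)
          · exact Or.inr rfl
    · simp

lemma goK_iff (inp : List String) (seen : PySem.Set String) :
    solutionGoK inp seen = true ↔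
      ¬ (inp.map pvKey).Nodup ∨ ∃ t ∈ inp, pvKey t ∈ seen := by
  induction inp generalizing seen with
  | nil => simp [solutionGoK]
  | cons t rest ih =>
    show (if PySem.Set.contains seen (pvKey t) then true
          else solutionGoK rest (PySem.Set.add seen (pvKey t))) = true ↔ _
    by_cases hm : pvKey t ∈ seen
    · rw [if_pos ((PySem.Set.contains_iff seen (pvKey t)).2 hm)]
      constructor
      · intro _
        exact Or.inr ⟨t, List.mem_cons_self .., hm⟩
      · intro _
        rfl
    · have : PySem.Set.contains seen (pvKey t) = false := by
        simp only [PySem.Set.contains_eq_listContains]; simp [hm]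
      rw [this]
      simp only [Bool.false_eq_true, if_false, ih]
      constructor
      · rintro (hnd | ⟨u, hu, hk⟩)
        · left; simp only [List.map_cons, List.nodup_cons, not_and_or]; right; exact hnd
        · rw [PySem.Set.mem_add] at hk
          rcases hk with hk | hk
          · right; exact ⟨u, List.mem_cons_of_mem _ hu, hk⟩
          · left
            simp only [List.map_cons, List.nodup_cons, not_and_or]
            left
            simp only [not_not]
            exact hk ▸ List.mem_map_of_mem hu
      · rintro (hnd | ⟨u, hu, hk⟩)
        · simp only [List.map_cons, List.nodup_cons, not_and_or, not_not] at hnd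
          rcases hnd with hmem | hnd
          · rcases List.mem_map.1 hmem with ⟨u, hu, hku⟩
            right; exact ⟨u, hu, by rw [PySem.Set.mem_add]; exact Or.inr hku⟩
          · left; exact hnd
        · rcases List.mem_cons.1 hu with rfl | hu
          · exact absurd hk hm
          · right; exact ⟨u, hu, by rw [PySem.Set.mem_add]; exact Or.inl hk⟩

lemma adjEq_iff (l : List String) (hs : l.Pairwise (· ≤ ·)) :
    adjEq l = true ↔ ¬ l.Nodup := by
  induction l with
  | nil => simp [adjEq]
  | cons a l ih =>
    cases l with
    | nil => simp [adjEq]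
    | cons b rest =>
      have hs' : (b :: rest).Pairwise (· ≤ ·) := hs.tail
      have hab : a ≤ b := (List.pairwise_cons.1 hs).1 b (List.mem_cons_self ..)
      show (a == b || adjEq (b :: rest)) = true ↔ _
      by_cases hab' : a = b
      · subst hab'
        simp [List.nodup_cons]
      · have hnm : a ∉ b :: rest := by
          intro hmem
          rcases List.mem_cons.1 hmem with rfl | hmem
          · exact hab' rfl
          · have hba : b ≤ a := (List.pairwise_cons.1 hs').1 a hmem
            exact hab' (le_antisymm hab hba)
        have : (a == b) = false := by simp [hab']
        rw [this, Bool.false_or, ih hs']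
        simp [List.nodup_cons, hnm]

lemma solution_iff (inp : List String) :
    solution inp = true ↔ ¬ (inp.map pvKey).Nodup := by
  rw [solution, goA_eq_goK inp PySem.Set.empty PySem.Set.empty (by simp [PySem.Set.empty]),
    goK_iff]
  simp [PySem.Set.empty]

lemma solution_alt_iff (inp : List String) :
    solution_alt inp = true ↔ ¬ (inp.map pvKey).Nodup := by
  have hkeys : inp.map (fun t => min t (pyRevStr t)) = inp.map pvKey := rfl
  rw [solution_alt]
  simp only [hkeys]
  rw [adjEq_iff _ (by simpa using PySem.List.sorted_pairwise (inp.map pvKey) (fun x => x))]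
  have hperm := PySem.List.sorted_perm (inp.map pvKey) (fun x => x) false
  rw [hperm.nodup_iff]

-- ===== VERDICT (by name: the statement is the Claim_ definition above) =====
theorem solution_spec : Claim_equal_solution := by
  intro inp _
  show solution inp = solution_alt inp
  rw [Bool.eq_iff_iff, solution_iff, solution_alt_iff]
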